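-- pv_equiv track=rewrite | github.com/alexandra-m95/Crossword | Crossword.py | get_coordinates_and_lengths
-- ===== SOURCE A (Python) =====
-- def get_coordinates_and_lengths(geometry):
--     """
--     Анализация строк геометрии. Составление координат для каждой буквы.
--     :param geometry: строки геометрии.
--     :return: список координат + список длин для каждого слова.
--     """
--     strs_count = 0
--     coordinates = []
--     words_lengths = []
--     for i in geometry:
--         i += "\n"
--         count_letter = 0
--         for j in range(len(i)):
--             if i[j] != '*' and count_letter > 1:
--                 coordinates +=\
--                     ([(strs_count, j - p - 1) for p in reversed(range(count_letter))])
--                 words_lengths.append(count_letter)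
--             if i[j] == '*':
--                 count_letter += 1
--             if i[j] != '*':
--                 count_letter = 0
--         strs_count += 1
--     return [words_lengths] + [coordinates]
-- ===== SOURCE B (Python) =====
-- def get_coordinates_and_lengths(geometry):
--     def row_runs(chars):
--         # Build the list of maximal '*'-runs as (start, length), traversing the
--         # row right-to-left and merging each star into the run that follows it.
--         runs = []
--         for c in range(len(chars) - 1, -1, -1):
--             if chars[c] == '*':
--                 if runs and runs[0][0] == c + 1:
--                     runs[0] = (c, runs[0][1] + 1)
--                 else:
--                     runs.insert(0, (c, 1))
--         return runs
--
--     words_lengths = []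
--     coordinates = []
--     for r, row in enumerate(geometry):
--         for s, ln in row_runs(row):
--             if ln >= 2:
--                 words_lengths.append(ln)
--                 coordinates.extend((r, c) for c in range(s, s + ln))
--     return [words_lengths] + [coordinates]
-- ===== Notes on version B (the rewrite author's own statement) =====
-- stated objective: alternative
-- what changed: Replaces A's forward per-character counter with a newline sentinel and a deferred backwards-index flush by a two-phase row analysis: a right-to-left traversal that merges stars into an explicit list of (start,length) runs, then a separate emission pass over that run list.
import Mathlib
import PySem

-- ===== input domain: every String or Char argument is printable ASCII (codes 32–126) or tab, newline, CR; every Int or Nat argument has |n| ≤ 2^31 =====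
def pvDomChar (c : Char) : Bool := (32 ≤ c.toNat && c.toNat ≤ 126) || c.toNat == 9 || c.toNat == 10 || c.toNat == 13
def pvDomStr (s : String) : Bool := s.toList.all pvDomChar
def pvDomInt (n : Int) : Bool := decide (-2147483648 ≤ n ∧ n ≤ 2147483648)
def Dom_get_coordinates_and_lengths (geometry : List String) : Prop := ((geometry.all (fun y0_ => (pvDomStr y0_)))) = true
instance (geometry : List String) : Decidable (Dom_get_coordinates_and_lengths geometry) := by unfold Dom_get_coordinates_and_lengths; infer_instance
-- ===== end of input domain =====

-- B replaces A's forward counter-with-sentinel scan by a two-phase row analysis: a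
-- right-to-left merge building an explicit (start,length) run list, then an emission pass
-- over that list (alternative decomposition; same asymptotic cost).

-- ===== PORT A =====
-- inner 'for j in range(len(i))' loop of A: j is the column counter, cnt is count_letter,
-- lens/coords are the global words_lengths/coordinates lists being appended to.
def aRow (strs : Int) (j : Nat) (cnt : Nat) (lens : List Int) (coords : List (Int × Int)) :
    List Char → Nat × List Int × List (Int × Int)
  | [] => (cnt, lens, coords)
  | c :: rest =>
    let lens' :=
      if c ≠ '*' ∧ cnt > 1 then lens ++ [(cnt : Int)] else lens
    let coords' :=
      if c ≠ '*' ∧ cnt > 1 then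
        coords ++ (List.range cnt).reverse.map (fun p : Nat => (strs, (j : Int) - (p : Int) - 1))
      else coords
    let cnt1 := if c = '*' then cnt + 1 else cnt
    let cnt2 := if c ≠ '*' then 0 else cnt1
    aRow strs (j + 1) cnt2 lens' coords' rest

-- outer 'for i in geometry' loop of A: strs is strs_count; each row gets "\n" appended.
def aOuter (strs : Int) (lens : List Int) (coords : List (Int × Int)) :
    List String → List Int × List (Int × Int)
  | [] => (lens, coords)
  | row :: rest =>
    let r := aRow strs 0 0 lens coords (row.toList ++ ['\n'])
    aOuter (strs + 1) r.2.1 r.2.2 rest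

def get_coordinates_and_lengths (geometry : List String) : List Int × (List (Int × Int)) :=
  aOuter 0 [] [] geometry

-- ===== PORT B =====
-- B's row_runs: the backward 'for c in range(len(chars)-1, -1, -1)' loop processes index c
-- after all higher indices; rendered as structural recursion, rrRuns j cs is the runs list
-- after processing the suffix cs starting at index j (Python's runs-front merge/insert).
def rrRuns (j : Nat) : List Char → List (Nat × Nat)
  | [] => []
  | c :: rest =>
    let runs := rrRuns (j + 1) rest
    if c = '*' then
      match runs with
      | (s, ln) :: tail => if s = j + 1 then (j, ln + 1) :: tail else (j, 1) :: (s, ln) :: tail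
      | [] => [(j, 1)]
    else runs

-- B's emission loop 'for s, ln in row_runs(row)' appending to the two global lists.
def bEmit (r : Int) (acc : List Int × List (Int × Int)) :
    List (Nat × Nat) → List Int × List (Int × Int)
  | [] => acc
  | (s, ln) :: rest =>
    bEmit r
      (if ln ≥ 2 then
        (acc.1 ++ [(ln : Int)], acc.2 ++ (List.range ln).map (fun d : Nat => (r, (s : Int) + (d : Int))))
       else acc) rest

-- B's outer 'for r, row in enumerate(geometry)' loop.
def bOuter (r : Int) (acc : List Int × List (Int × Int)) :
    List String → List Int × List (Int × Int)
  | [] => acc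
  | row :: rest => bOuter (r + 1) (bEmit r acc (rrRuns 0 row.toList)) rest

def get_coordinates_and_lengths_alt (geometry : List String) : List Int × (List (Int × Int)) :=
  bOuter 0 ([], []) geometry

-- ===== PRECONDITION & SPEC =====
def Spec_get_coordinates_and_lengths (geometry : List String) (out : List Int × (List (Int × Int))) : Prop := out = get_coordinates_and_lengths_alt geometry
instance (geometry : List String) (out : List Int × (List (Int × Int))) : Decidable (Spec_get_coordinates_and_lengths geometry out) := by unfold Spec_get_coordinates_and_lengths; infer_instance

-- ===== CLAIM (what is proved, stated in full; the proofs are below) =====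
def Claim_equal_get_coordinates_and_lengths : Prop := ∀ (geometry : List String), Dom_get_coordinates_and_lengths geometry → Spec_get_coordinates_and_lengths geometry (get_coordinates_and_lengths geometry)

-- ===== LEMMAS AND PROOFS =====

-- proof-side forward run scan: emits each maximal run's length and coordinates directly.
def rsB (idx : Int) (j : Int) : List Char → List Int × List (Int × Int)
  | [] => ([], [])
  | c :: rest =>
    if c = '*' then
      let len := 1 + (rest.takeWhile (· = '*')).length
      let tail := rest.dropWhile (· = '*')
      let r := rsB idx (j + (len : Int)) tail
      if len ≥ 2 then
        ((len : Int) :: r.1, (List.range len).map (fun d : Nat => (idx, j + (d : Int))) ++ r.2)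
      else r
    else rsB idx (j + 1) rest
  termination_by cs => cs.length
  decreasing_by
  · have := List.length_dropWhile_le (fun x => decide (x = '*')) rest
    simp only [List.length_cons]; omega
  · simp

-- proof-side forward run scan, run list only.
def runList (j : Nat) : List Char → List (Nat × Nat)
  | [] => []
  | c :: rest =>
    if c = '*' then
      let len := 1 + (rest.takeWhile (· = '*')).length
      (j, len) :: runList (j + len) (rest.dropWhile (· = '*'))
    else runList (j + 1) rest
  termination_by cs => cs.length
  decreasing_by
  · have := List.length_dropWhile_le (fun x => decide (x = '*')) rest
    simp only [List.length_cons]; omega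
  · simp

-- proof-side single-run emission (cons/append form of B's emission).
def emitR (r : Int) : List (Nat × Nat) → List Int × List (Int × Int)
  | [] => ([], [])
  | (s, ln) :: rest =>
    let e := emitR r rest
    if ln ≥ 2 then
      ((ln : Int) :: e.1, (List.range ln).map (fun d : Nat => ((r, (s : Int) + (d : Int)) : Int × Int)) ++ e.2)
    else e

-- A's flush comprehension (reversed range, backwards offsets) lists the run's columns ascending.
lemma rangeRevMapPair (strs : Int) : ∀ (n : Nat) (j : Int),
    ((List.range n).map (fun p : Nat => (strs, j - (p : Int) - 1))).reverse =
      (List.range n).map (fun d : Nat => (strs, (j - (n : Int)) + (d : Int))) := by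
  intro n j
  apply List.ext_getElem
  · simp
  · intro i h1 h2
    simp only [List.length_reverse, List.length_map, List.length_range] at h1 h2
    simp only [List.getElem_reverse, List.getElem_map, List.getElem_range, List.length_map,
      List.length_range, Prod.mk.injEq, true_and]
    omega

lemma takeWhile_rep (m : Nat) (c : Char) (rest : List Char) (hc : ¬ c = '*') :
    (List.replicate m '*' ++ c :: rest).takeWhile (· = '*') = List.replicate m '*' := by
  induction m with
  | zero => simp [hc]
  | succ k ih => simp [List.replicate_succ, ih]

lemma dropWhile_rep (m : Nat) (c : Char) (rest : List Char) (hc : ¬ c = '*') :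
    (List.replicate m '*' ++ c :: rest).dropWhile (· = '*') = c :: rest := by
  induction m with
  | zero => simp [hc]
  | succ k ih => simp [List.replicate_succ, ih]

lemma takeWhile_rep_all (m : Nat) :
    (List.replicate m '*').takeWhile (· = '*') = List.replicate m '*' := by
  induction m with
  | zero => simp
  | succ k ih => simp [List.replicate_succ, ih]

lemma dropWhile_rep_all (m : Nat) :
    (List.replicate m '*').dropWhile (· = '*') = [] := by
  induction m with
  | zero => simp
  | succ k ih => simp [List.replicate_succ, ih]

-- key per-row lemma: running A's loop with cnt pending stars on cs++['\n'] equals appending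
-- the forward run-scan of (cnt stars)++cs starting at column j-cnt; the final count_letter is 0.
lemma row_key (strs : Int) : ∀ (cs : List Char) (j cnt : Nat) (lens : List Int) (coords : List (Int × Int)),
    aRow strs j cnt lens coords (cs ++ ['\n']) =
      (0, lens ++ (rsB strs ((j : Int) - (cnt : Int)) (List.replicate cnt '*' ++ cs)).1,
          coords ++ (rsB strs ((j : Int) - (cnt : Int)) (List.replicate cnt '*' ++ cs)).2) := by
  intro cs
  induction cs with
  | nil =>
    intro j cnt lens coords
    have h2 : ¬ (('\n':Char) = '*') := by decide
    match cnt with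
    | 0 => simp [aRow, rsB]
    | 1 => simp [aRow, rsB, List.replicate_succ, takeWhile_rep_all, dropWhile_rep_all]
    | (m+2) =>
      have hgt : (1:Nat) < m + 2 := by omega
      have hb : rsB strs ((j : Int) - ((m+2 : Nat) : Int)) (List.replicate (m+2) '*') =
          ([((m+2 : Nat) : Int)],
           (List.range (m+2)).map (fun d : Nat => (strs, ((j : Int) - ((m+2 : Nat) : Int)) + (d : Int)))) := by
        rw [List.replicate_succ, rsB, if_pos rfl]
        simp only [takeWhile_rep_all, dropWhile_rep_all, List.length_replicate]
        have hlen : 1 + (m + 1) = m + 2 := by omega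
        rw [hlen, rsB, if_pos (by omega : m + 2 ≥ 2)]
        simp
      push_cast at hb
      simp [aRow, h2, hgt, hb, rangeRevMapPair, List.append_nil]
  | cons c rest ih =>
    intro j cnt lens coords
    by_cases hc : c = '*'
    · subst hc
      have e2 : (('*':Char) = '*') = True := by simp
      have e3 : (('*':Char) ≠ '*') = False := by simp
      simp only [List.cons_append, aRow, e2, e3, false_and, if_false, if_true]
      rw [ih]
      have harg : (((j+1 : Nat)) : Int) - (((cnt+1 : Nat)) : Int) = (j : Int) - (cnt : Int) := by
        push_cast; ring
      have hl : List.replicate (cnt+1) '*' ++ rest = List.replicate cnt '*' ++ ('*' :: rest) := by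
        rw [List.replicate_succ']; simp
      rw [harg, hl]
    · have e2 : (c = '*') = False := by simp [hc]
      have e3 : (c ≠ '*') = True := by simp [hc]
      match cnt with
      | 0 =>
        have e4 : ((0:Nat) > 1) = False := by simp
        simp only [List.cons_append, aRow, e2, e3, e4, true_and, and_false, if_false, if_true]
        rw [ih]
        have hb : rsB strs ((j : Int) - ((0:Nat):Int)) (List.replicate 0 '*' ++ c :: rest) =
            rsB strs (((j+1 : Nat) : Int) - ((0:Nat):Int)) (List.replicate 0 '*' ++ rest) := by
          simp only [List.replicate, List.nil_append]
          rw [rsB, if_neg hc]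
          push_cast; norm_num
        rw [hb]
      | 1 =>
        have e4 : ((1:Nat) > 1) = False := by simp
        simp only [List.cons_append, aRow, e2, e3, e4, true_and, and_false, if_false, if_true]
        rw [ih]
        have hb : rsB strs ((j : Int) - ((1:Nat):Int)) (List.replicate 1 '*' ++ c :: rest) =
            rsB strs (((j+1 : Nat) : Int) - ((0:Nat):Int)) (List.replicate 0 '*' ++ rest) := by
          simp only [List.replicate, List.nil_append, List.cons_append]
          rw [rsB, if_pos rfl]
          rw [List.takeWhile_cons_of_neg (by simp [hc]), List.dropWhile_cons_of_neg (by simp [hc])]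
          simp only [List.length_nil]
          rw [if_neg (by omega : ¬ (1 + 0 ≥ 2))]
          rw [rsB, if_neg hc]
          push_cast; norm_num
        rw [hb]
      | (m+2) =>
        have hgt : (1:Nat) < m + 2 := by omega
        have e4 : (m + 2 > 1) = True := by simp [hgt]
        simp only [List.cons_append, aRow, e2, e3, e4, true_and, and_true, if_false, if_true]
        rw [ih]
        have hb : rsB strs ((j : Int) - ((m+2:Nat):Int)) (List.replicate (m+2) '*' ++ c :: rest) =
            ((((m+2:Nat)) : Int) :: (rsB strs (((j+1 : Nat):Int) - ((0:Nat):Int)) (List.replicate 0 '*' ++ rest)).1,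
             (List.range (m+2)).map (fun d : Nat => (strs, ((j : Int) - ((m+2:Nat):Int)) + (d : Int))) ++
               (rsB strs (((j+1 : Nat):Int) - ((0:Nat):Int)) (List.replicate 0 '*' ++ rest)).2) := by
          rw [List.replicate_succ, List.cons_append, rsB, if_pos rfl]
          rw [takeWhile_rep (m+1) c rest hc, dropWhile_rep (m+1) c rest hc]
          simp only [List.length_replicate]
          have hlen : 1 + (m + 1) = m + 2 := by omega
          rw [hlen, if_pos (by omega : m + 2 ≥ 2)]
          rw [rsB, if_neg hc]
          have harg : ((j : Int) - ((m+2:Nat):Int)) + ((m+2 : Nat) : Int) + 1 =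
              (((j+1 : Nat):Int) - ((0:Nat):Int)) := by push_cast; ring
          rw [List.replicate, List.nil_append]
          rw [show ((j : Int) - ((m+2:Nat):Int)) + ((m+2 : Nat) : Int) = (j : Int) by push_cast; ring]
          norm_num
        rw [hb]
        simp [rangeRevMapPair, List.append_assoc]

-- every run produced by runList k starts at column ≥ k.
lemma runList_head_ge : ∀ (cs : List Char) (k s ln : Nat) (t : List (Nat × Nat)),
    runList k cs = (s, ln) :: t → k ≤ s := by
  intro cs
  induction cs with
  | nil => intro k s ln t h; simp [runList] at h
  | cons c rest ih =>
    intro k s ln t h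
    rw [runList] at h
    by_cases hc : c = '*'
    · rw [if_pos hc] at h
      have : s = k := by exact (Prod.mk.injEq _ _ _ _ ▸ (List.cons.injEq _ _ _ _ ▸ h).1).1.symm
      omega
    · rw [if_neg hc] at h
      have := ih (k+1) s ln t h
      omega

-- the backward merge produces exactly the forward scan's run list.
lemma rr_eq_runList : ∀ (cs : List Char) (j : Nat), rrRuns j cs = runList j cs := by
  intro cs
  induction cs with
  | nil => intro j; simp [rrRuns, runList]
  | cons c rest ih =>
    intro j
    by_cases hc : c = '*'
    · subst hc
      cases rest with
      | nil => simp [rrRuns, runList]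
      | cons c' rs' =>
        by_cases hc' : c' = '*'
        · subst hc'
          have h1 : runList (j+1) ('*' :: rs') =
              (j+1, 1 + (rs'.takeWhile (· = '*')).length) ::
                runList (j+1+(1 + (rs'.takeWhile (· = '*')).length)) (rs'.dropWhile (· = '*')) := by
            rw [runList, if_pos rfl]
          rw [rrRuns]
          simp only [ih, h1, if_pos rfl]
          rw [runList, if_pos rfl]
          rw [List.takeWhile_cons_of_pos (by simp), List.dropWhile_cons_of_pos (by simp)]
          simp only [List.length_cons]
          have e1 : 1 + (rs'.takeWhile (· = '*')).length + 1 =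
              1 + ((rs'.takeWhile (· = '*')).length + 1) := by omega
          have e2 : j + 1 + (1 + (rs'.takeWhile (· = '*')).length) =
              j + (1 + ((rs'.takeWhile (· = '*')).length + 1)) := by omega
          rw [e1, e2]
          simp
        · have hr : runList (j+1) (c' :: rs') = runList (j+2) rs' := by
            rw [runList, if_neg hc']
          rw [rrRuns]
          simp only [ih, hr, if_pos rfl]
          conv_rhs => rw [runList, if_pos rfl]
          rw [List.takeWhile_cons_of_neg (by simp [hc']), List.dropWhile_cons_of_neg (by simp [hc'])]
          simp only [List.length_nil]
          have hjrw : j + (1 + 0) = j + 1 := by omega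
          rw [hjrw]
          have hrw2 : runList (j+1) (c' :: rs') = runList (j+2) rs' := hr
          rw [← hrw2]
          cases h : runList (j+2) rs' with
          | nil => rw [hr, h]; simp
          | cons p t =>
            obtain ⟨s, ln⟩ := p
            have hge := runList_head_ge rs' (j+2) s ln t h
            have hne : ¬ (s = j + 1) := by omega
            rw [hr, h]
            simp [hne]
    · rw [rrRuns]
      simp only [if_neg hc, ih]
      rw [runList, if_neg hc]

-- the direct-emission forward scan equals emitR of the forward run list.
lemma rsB_eq_emitR (r : Int) : ∀ (n : Nat) (cs : List Char), cs.length ≤ n → ∀ (j : Nat),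
    rsB r (j : Int) cs = emitR r (runList j cs) := by
  intro n
  induction n with
  | zero =>
    intro cs h j
    have : cs = [] := List.length_eq_zero_iff.mp (by omega)
    subst this; simp [rsB, runList, emitR]
  | succ m ih =>
    intro cs h j
    cases cs with
    | nil => simp [rsB, runList, emitR]
    | cons c rest =>
      by_cases hc : c = '*'
      · rw [rsB, if_pos hc, runList, if_pos hc]
        simp only [emitR]
        have hlen : (rest.dropWhile (· = '*')).length ≤ m := by
          have := List.length_dropWhile_le (fun x => decide (x = '*')) rest
          simp only [List.length_cons] at h
          omega
        have harg : ((j : Int) + ((1 + (rest.takeWhile (· = '*')).length : Nat) : Int)) =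
            (((j + (1 + (rest.takeWhile (· = '*')).length) : Nat)) : Int) := by push_cast; ring
        rw [harg, ih _ hlen]
      · rw [rsB, if_neg hc, runList, if_neg hc]
        have harg : ((j : Int) + 1) = (((j + 1 : Nat)) : Int) := by push_cast; ring
        rw [harg]
        exact ih rest (by simp at h; omega) (j+1)

-- B's accumulator-style emission in terms of emitR.
lemma bEmit_acc (r : Int) : ∀ (runs : List (Nat × Nat)) (acc : List Int × List (Int × Int)),
    bEmit r acc runs = (acc.1 ++ (emitR r runs).1, acc.2 ++ (emitR r runs).2) := by
  intro runs
  induction runs with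
  | nil => intro acc; simp [bEmit, emitR]
  | cons p rest ih =>
    intro acc
    obtain ⟨s, ln⟩ := p
    by_cases hl : ln ≥ 2
    · simp only [bEmit, emitR, if_pos hl, ih]
      simp [List.append_assoc]
    · simp only [bEmit, emitR, if_neg hl, ih]

-- per-row: B's row processing appends the forward scan's emission.
lemma b_row (r : Int) (row : String) (acc : List Int × List (Int × Int)) :
    bEmit r acc (rrRuns 0 row.toList) =
      (acc.1 ++ (rsB r 0 row.toList).1, acc.2 ++ (rsB r 0 row.toList).2) := by
  rw [rr_eq_runList, bEmit_acc]
  have := rsB_eq_emitR r row.toList.length row.toList (le_refl _) 0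
  simp only [Nat.cast_zero] at this
  rw [this]

lemma outer_key : ∀ (g : List String) (strs : Int) (lens : List Int) (coords : List (Int × Int)),
    aOuter strs lens coords g = bOuter strs (lens, coords) g := by
  intro g
  induction g with
  | nil => intro strs lens coords; rfl
  | cons row rest ih =>
    intro strs lens coords
    have h := row_key strs row.toList 0 0 lens coords
    simp only [aOuter, bOuter]
    norm_num at h
    rw [h, b_row]
    exact ih _ _ _

-- ===== VERDICT (by name: the statement is the Claim_ definition above) =====
theorem get_coordinates_and_lengths_spec : Claim_equal_get_coordinates_and_lengths := by
  intro g _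
  show get_coordinates_and_lengths g = get_coordinates_and_lengths_alt g
  exact outer_key g 0 [] []
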